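-- pv_equiv track=rewrite | github.com/jessieharada6/LeetCode | Structures & Algo/D. Dynamic Programming/9-dp/1278. Palindrome Partitioning III/palindromePartition.py | palindromePartition
-- ===== SOURCE A (Python) =====
-- def palindromePartition(s: str, K: int) -> int:
--     n = len(s)
--     # @cache
--     # def cost(l, r):
--     #     # change = 0
--     #     # while l < r:
--     #     #     change += s[l] != s[r]:
--     #     #     l += 1
--     #     #     r -= 1
--     #     # return change
--     #     if l >= r: return 0
--     #     if s[l] == s[r]:
--     #         return cost(l + 1, r - 1)
--     #     else:
--     #         return cost(l + 1, r - 1) + 1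
--
--     cost = [[0] * n for _ in range(n)]
--     for l in range(n - 1, -1, -1):
--         for r in range(l + 1, n):
--             if s[l] == s[r]:
--                 cost[l][r] = cost[l + 1][r - 1]
--             else:
--                 cost[l][r] = cost[l + 1][r - 1] + 1
--
--     # @cache
--     # def dfs(left, k):
--     #     if k == 1: return cost(left, n - 1)
--     #     return min(cost(left, nextLeft - 1) + dfs(nextLeft, k - 1) for nextLeft in range(left + 1, n - k + 2))
--
--     # return dfs(0, K)
--
--     f = [[0] * (K + 1) for _ in range(n)]
--     for left in range(n - 1, -1, -1):
--         for k in range(1, min(n - left + 1, K + 1)):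
--             if k == 1: f[left][k] = cost[left][n - 1]
--             else: f[left][k] = min(cost[left][nextLeft - 1] + f[nextLeft][k - 1] for nextLeft in range(left + 1, n - k + 2))
--     return f[0][K]
-- ===== SOURCE B (Python) =====
-- def palindromePartition(s: str, K: int) -> int:
--     n = len(s)
--     # pair-mismatch table filled by expanding outward around each palindrome center
--     cost = [[0] * n for _ in range(n)]
--     for c in range(n):
--         for l, r in ((c, c), (c, c + 1)):
--             acc = 0
--             while l >= 0 and r < n:
--                 acc += s[l] != s[r]
--                 cost[l][r] = acc
--                 l -= 1
--                 r += 1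
--     # K rounds of a rolling 1-D prefix DP: after round k, dp[i] = min changes to
--     # split s[:i] into k palindromes (cells outside [k, n] stay 0)
--     dp = [0] * (n + 1)
--     for k in range(1, K + 1):
--         ndp = [0] * (n + 1)
--         for i in range(k, n + 1):
--             if k == 1:
--                 ndp[i] = cost[0][i - 1]
--             else:
--                 ndp[i] = min(dp[m] + cost[m][i - 1] for m in range(k - 1, i))
--         dp = ndp
--     return dp[n]
-- ===== Notes on version B (the rewrite author's own statement) =====
-- stated objective: alternative
-- what changed: B fills the mismatch table by expanding outward around each palindrome center with a running accumulator (instead of A's row-by-row interval DP reading earlier table cells), and replaces A's 2-D backward suffix DP f[left][k] by K rounds of a rolling 1-D forward prefix array that splits off the LAST palindrome, allocating a fresh zero row each round.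
import Mathlib
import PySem

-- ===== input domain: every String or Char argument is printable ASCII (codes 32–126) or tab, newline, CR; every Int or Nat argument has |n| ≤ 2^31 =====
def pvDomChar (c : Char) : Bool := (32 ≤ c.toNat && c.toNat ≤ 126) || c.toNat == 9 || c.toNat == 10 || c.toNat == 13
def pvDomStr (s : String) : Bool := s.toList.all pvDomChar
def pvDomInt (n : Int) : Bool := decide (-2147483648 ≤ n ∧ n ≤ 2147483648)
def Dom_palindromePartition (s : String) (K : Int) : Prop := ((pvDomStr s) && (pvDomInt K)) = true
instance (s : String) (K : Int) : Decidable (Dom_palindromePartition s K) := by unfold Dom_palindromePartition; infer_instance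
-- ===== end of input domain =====

-- B fills the mismatch table by expanding around each palindrome center with a running
-- accumulator (A: interval DP reading earlier table cells) and replaces A's 2-D backward
-- suffix DP by K rounds of a rolling 1-D forward prefix array splitting off the LAST
-- palindrome, a fresh zero row per round (objective: alternative, same asymptotic cost).

-- ===== PORT A =====
-- Python `min(...)` over a generator; every generator minimized over below is nonempty, so the
-- `[]` case (Python: ValueError) is never reached.
def pvListMin : List Int → Int
  | [] => 0
  | x :: xs => xs.foldl min x

-- Python's 2-dim tables (lists of lists) as Array (Array Int); all reads and writes below are
-- in range on the admitted inputs, so getD/setIfInBounds are exact.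
def pvGet2 (t : Array (Array Int)) (i j : Nat) : Int := (t.getD i #[]).getD j 0

def pvSet2 (t : Array (Array Int)) (i j : Nat) (v : Int) : Array (Array Int) :=
  t.modify i (fun row => row.setIfInBounds j v)

-- A's cost table: for l = n-1..0, r = l+1..n-1, cost[l][r] = cost[l+1][r-1] (+1 on mismatch)
def pvCostVal (s : List Char) (cost : Array (Array Int)) (l r : Nat) : Int :=
  if s.getD l ' ' = s.getD r ' ' then pvGet2 cost (l+1) (r-1) else pvGet2 cost (l+1) (r-1) + 1

def pvCostStep (s : List Char) (n : Nat) (cost : Array (Array Int)) (l : Nat) :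
    Array (Array Int) :=
  (List.range' (l+1) (n - (l+1))).foldl (fun cost r => pvSet2 cost l r (pvCostVal s cost l r)) cost

def pvCost (s : List Char) (n : Nat) : Array (Array Int) :=
  (List.range n).reverse.foldl (pvCostStep s n) (Array.replicate n (Array.replicate n 0))

-- body of A's k-loop: the value written into f[left][k]
def pvValA (cost : Array (Array Int)) (n : Nat) (f : Array (Array Int)) (L k : Nat) : Int :=
  if k = 1 then pvGet2 cost L (n-1)
  else pvListMin ((List.range' (L+1) ((n - k + 2) - (L+1))).map
        (fun nl => pvGet2 cost L (nl-1) + pvGet2 f nl (k-1)))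

-- A's inner loop: k in range(1, min(n-left+1, K+1))
def pvStepA (cost : Array (Array Int)) (n kk : Nat) (f : Array (Array Int)) (L : Nat) :
    Array (Array Int) :=
  (List.range' 1 (min (n - L + 1) (kk + 1) - 1)).foldl
    (fun f k => pvSet2 f L k (pvValA cost n f L k)) f

-- A: suffix DP, left from n-1 down to 0 (range(n-1,-1,-1) = (List.range n).reverse), return f[0][K]
def palindromePartition (s : String) (K : Int) : Int :=
  let n := s.length
  let kk := K.toNat    -- Pre_ gives 0 ≤ K; f[0][K] with K < 0 raises in Python
  let cost := pvCost s.toList n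
  pvGet2 (((List.range n).reverse).foldl (pvStepA cost n kk)
    (Array.replicate n (Array.replicate (kk+1) 0))) 0 kk

-- ===== PORT B =====
-- B's center expansion: while l >= 0 and r < n: acc += s[l] != s[r]; cost[l][r] = acc; l -= 1; r += 1
def pvExpand (s : List Char) (n : Nat) (cost : Array (Array Int)) (l : Int) (r : Nat)
    (acc : Int) : Array (Array Int) :=
  if h : 0 ≤ l ∧ r < n then
    pvExpand s n
      (pvSet2 cost l.toNat r (acc + (if s.getD l.toNat ' ' = s.getD r ' ' then 0 else 1)))
      (l - 1) (r + 1)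
      (acc + (if s.getD l.toNat ' ' = s.getD r ' ' then 0 else 1))
  else cost
termination_by n - r
decreasing_by omega

-- B's cost table: for each c, expand around the odd center (c,c) then the even center (c,c+1)
def pvCostB (s : List Char) (n : Nat) : Array (Array Int) :=
  (List.range n).foldl
    (fun (cost : Array (Array Int)) (c : Nat) => pvExpand s n (pvExpand s n cost (c : Int) c 0) (c : Int) (c+1) 0)
    (Array.replicate n (Array.replicate n 0))

-- value written into ndp[i] during round k
def pvRowVal (cost : Array (Array Int)) (dp : Array Int) (k i : Nat) : Int :=
  if k = 1 then pvGet2 cost 0 (i-1)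
  else pvListMin ((List.range' (k-1) (i - (k-1))).map
        (fun m => dp.getD m 0 + pvGet2 cost m (i-1)))

-- one round: ndp = [0]*(n+1); for i in range(k, n+1): ndp[i] = ...
def pvRound (cost : Array (Array Int)) (n : Nat) (dp : Array Int) (k : Nat) : Array Int :=
  (List.range' k (n + 1 - k)).foldl (fun ndp i => ndp.setIfInBounds i (pvRowVal cost dp k i))
    (Array.replicate (n+1) 0)

-- B: K rounds of the rolling prefix array, return dp[n]
def palindromePartition_alt (s : String) (K : Int) : Int :=
  let n := s.length
  let cost := pvCostB s.toList n
  ((List.range' 1 K.toNat).foldl (pvRound cost n) (Array.replicate (n+1) 0)).getD n 0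

-- ===== PRECONDITION & SPEC =====
-- Pre_ excludes exactly the inputs where Python A raises IndexError: the empty string
-- (f = [] so f[0][K] fails) and K < 0 (the rows [0]*(K+1) are empty so f[0][K] fails).
def Pre_palindromePartition (s : String) (K : Int) : Prop := s ≠ "" ∧ 0 ≤ K
instance (s : String) (K : Int) : Decidable (Pre_palindromePartition s K) := by
  unfold Pre_palindromePartition; infer_instance
def pvWitness_palindromePartition : String × Int := ("ab", 1)

def Spec_palindromePartition (s : String) (K : Int) (out : Int) : Prop := out = palindromePartition_alt s K
instance (s : String) (K : Int) (out : Int) : Decidable (Spec_palindromePartition s K out) := by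
  unfold Spec_palindromePartition; infer_instance

-- ===== CLAIM (what is proved, stated in full; the proofs are below) =====
def Claim_equal_palindromePartition : Prop := ∀ (s : String) (K : Int), Dom_palindromePartition s K → Pre_palindromePartition s K → Spec_palindromePartition s K (palindromePartition s K)

-- ===== LEMMAS AND PROOFS =====

-- ---- basic facts about foldl min / pvListMin ----
lemma pvFoldlMin_le_init (xs : List Int) (a : Int) : xs.foldl min a ≤ a := by
  induction xs generalizing a with
  | nil => simp
  | cons x xs ih => exact le_trans (ih (min a x)) (min_le_left a x)

lemma pvFoldlMin_le_mem (xs : List Int) (a x : Int) (hx : x ∈ xs) : xs.foldl min a ≤ x := by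
  induction xs generalizing a with
  | nil => cases hx
  | cons y ys ih =>
    rcases List.mem_cons.mp hx with rfl | h
    · exact le_trans (pvFoldlMin_le_init ys (min a x)) (min_le_right a x)
    · exact ih (min a y) h

lemma pvLe_foldlMin (xs : List Int) (a v : Int) (ha : v ≤ a) (h : ∀ x ∈ xs, v ≤ x) :
    v ≤ xs.foldl min a := by
  induction xs generalizing a with
  | nil => simpa using ha
  | cons y ys ih =>
    exact ih (min a y) (le_min ha (h y (by simp))) (fun x hx => h x (by simp [hx]))

lemma pvFoldlMin_mem (xs : List Int) (a : Int) : xs.foldl min a = a ∨ xs.foldl min a ∈ xs := by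
  induction xs generalizing a with
  | nil => left; rfl
  | cons y ys ih =>
    simp only [List.foldl_cons]
    rcases ih (min a y) with h | h
    · rcases min_choice a y with h2 | h2
      · left; rw [h, h2]
      · right; rw [h, h2]; simp
    · right; simp [h]

lemma pvListMin_le {l : List Int} {x : Int} (hx : x ∈ l) : pvListMin l ≤ x := by
  cases l with
  | nil => cases hx
  | cons y ys =>
    rcases List.mem_cons.mp hx with rfl | h
    · exact pvFoldlMin_le_init ys x
    · exact pvFoldlMin_le_mem ys y x h

lemma pvLe_listMin {l : List Int} (hne : l ≠ []) {v : Int} (h : ∀ x ∈ l, v ≤ x) :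
    v ≤ pvListMin l := by
  cases l with
  | nil => exact absurd rfl hne
  | cons y ys => exact pvLe_foldlMin ys y v (h y (by simp)) (fun x hx => h x (by simp [hx]))

lemma pvListMin_mem {l : List Int} (hne : l ≠ []) : pvListMin l ∈ l := by
  cases l with
  | nil => exact absurd rfl hne
  | cons y ys =>
    show ys.foldl min y ∈ y :: ys
    rcases pvFoldlMin_mem ys y with h | h
    · rw [h]; simp
    · simp [h]

lemma pvListMin_congr_mem {l₁ l₂ : List Int} (h1 : l₁ ≠ []) (h2 : l₂ ≠ [])
    (h : ∀ x, x ∈ l₁ ↔ x ∈ l₂) : pvListMin l₁ = pvListMin l₂ :=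
  le_antisymm (pvListMin_le ((h _).mpr (pvListMin_mem h2)))
    (pvListMin_le ((h _).mp (pvListMin_mem h1)))

lemma pvListMin_nested (A : List Nat) (F : Nat → List Int) (hA : A ≠ [])
    (hF : ∀ a ∈ A, F a ≠ []) :
    pvListMin (A.map (fun a => pvListMin (F a))) = pvListMin (A.flatMap F) := by
  have hmapne : A.map (fun a => pvListMin (F a)) ≠ [] := by simpa using hA
  have hflatne : A.flatMap F ≠ [] := by
    cases A with
    | nil => exact absurd rfl hA
    | cons a as =>
      have : pvListMin (F a) ∈ (a :: as).flatMap F :=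
        List.mem_flatMap.mpr ⟨a, by simp, pvListMin_mem (hF a (by simp))⟩
      exact List.ne_nil_of_mem this
  apply le_antisymm
  · apply pvLe_listMin hflatne
    intro x hx
    rcases List.mem_flatMap.mp hx with ⟨a, ha, hxa⟩
    exact le_trans (pvListMin_le (List.mem_map.mpr ⟨a, ha, rfl⟩)) (pvListMin_le hxa)
  · apply pvLe_listMin hmapne
    intro x hx
    rcases List.mem_map.mp hx with ⟨a, ha, rfl⟩
    exact pvListMin_le (List.mem_flatMap.mpr ⟨a, ha, pvListMin_mem (hF a ha)⟩)

lemma pvFoldlMin_map_add_left (C : Int) (f : Nat → Int) (xs : List Nat) :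
    ∀ a : Int, (xs.map (fun x => C + f x)).foldl min (C + a) = C + (xs.map f).foldl min a := by
  induction xs with
  | nil => intro a; simp
  | cons y ys ih =>
    intro a
    simp only [List.map_cons, List.foldl_cons]
    rw [min_add_add_left, ih]

lemma pvListMin_map_add_left (C : Int) (f : Nat → Int) {l : List Nat} (h : l ≠ []) :
    pvListMin (l.map (fun x => C + f x)) = C + pvListMin (l.map f) := by
  cases l with
  | nil => exact absurd rfl h
  | cons y ys =>
    show ((ys.map fun x => C + f x).foldl min (C + f y)) = C + (ys.map f).foldl min (f y)
    exact pvFoldlMin_map_add_left C f ys (f y)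

lemma pvFoldlMin_map_add_right (C : Int) (f : Nat → Int) (xs : List Nat) :
    ∀ a : Int, (xs.map (fun x => f x + C)).foldl min (a + C) = (xs.map f).foldl min a + C := by
  induction xs with
  | nil => intro a; simp
  | cons y ys ih =>
    intro a
    simp only [List.map_cons, List.foldl_cons]
    rw [min_add_add_right, ih]

lemma pvListMin_map_add_right (C : Int) (f : Nat → Int) {l : List Nat} (h : l ≠ []) :
    pvListMin (l.map (fun x => f x + C)) = pvListMin (l.map f) + C := by
  cases l with
  | nil => exact absurd rfl h
  | cons y ys =>
    show ((ys.map fun x => f x + C).foldl min (f y + C)) = (ys.map f).foldl min (f y) + C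
    exact pvFoldlMin_map_add_right C f ys (f y)

lemma pvRange'_ne_nil (a n : Nat) (h : 1 ≤ n) : List.range' a n ≠ [] := by
  cases n with
  | zero => omega
  | succ m => rw [List.range'_succ]; simp

-- ---- the table representation: shape invariant and the get-after-set law ----
def pvShape (t : Array (Array Int)) (R C : Nat) : Prop :=
  t.size = R ∧ ∀ i, i < R → (t.getD i #[]).size = C

lemma pvGet2_eq (t : Array (Array Int)) (i j : Nat) :
    pvGet2 t i j = ((t[i]?.getD #[])[j]?).getD 0 := by
  simp [pvGet2, Array.getD_eq_getD_getElem?]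

lemma pvShape_set2 {t : Array (Array Int)} {R C : Nat} (i j : Nat) (v : Int)
    (h : pvShape t R C) : pvShape (pvSet2 t i j v) R C := by
  obtain ⟨h1, h2⟩ := h
  refine ⟨by simp [pvSet2, h1], ?_⟩
  intro r hr
  rw [Array.getD_eq_getD_getElem?, pvSet2, Array.getElem?_modify]
  by_cases hri : i = r
  · subst hri
    have hlt : i < t.size := by omega
    rw [Array.getElem?_eq_getElem hlt]
    have := h2 i hr
    rw [Array.getD_eq_getD_getElem?, Array.getElem?_eq_getElem hlt] at this
    simpa [Array.size_setIfInBounds] using this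
  · rw [if_neg hri, ← Array.getD_eq_getD_getElem?]
    exact h2 r hr

lemma pvGet2_set2 {t : Array (Array Int)} {R C : Nat} {i j : Nat} (v : Int) (i' j' : Nat)
    (h : pvShape t R C) (hi : i < R) (hj : j < C) :
    pvGet2 (pvSet2 t i j v) i' j' = if i' = i ∧ j' = j then v else pvGet2 t i' j' := by
  obtain ⟨h1, h2⟩ := h
  have hlt : i < t.size := by omega
  have hrow : (t[i]).size = C := by
    have := h2 i hi
    rwa [Array.getD_eq_getD_getElem?, Array.getElem?_eq_getElem hlt] at this
  rw [pvGet2_eq, pvSet2, Array.getElem?_modify]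
  by_cases hii : i' = i
  · subst hii
    rw [if_pos rfl, Array.getElem?_eq_getElem hlt, Option.map_some, Option.getD_some,
        Array.getElem?_setIfInBounds]
    by_cases hjj : j' = j
    · subst hjj
      rw [if_pos rfl, if_pos (by omega), if_pos ⟨rfl, rfl⟩, Option.getD_some]
    · rw [if_neg (fun h => hjj h.symm), if_neg (by tauto), pvGet2_eq,
        Array.getElem?_eq_getElem hlt, Option.getD_some]
  · rw [if_neg (fun h => hii h.symm), if_neg (by tauto), pvGet2_eq]

lemma pvShape_replicate (R C : Nat) :
    pvShape (Array.replicate R (Array.replicate C (0:Int))) R C := by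
  refine ⟨by simp, ?_⟩
  intro i hi
  rw [Array.getD_eq_getD_getElem?, Array.getElem?_replicate, if_pos hi]
  simp

lemma pvGet2_replicate (R C i j : Nat) :
    pvGet2 (Array.replicate R (Array.replicate C (0:Int))) i j = 0 := by
  rw [pvGet2_eq, Array.getElem?_replicate]
  by_cases hi : i < R
  · rw [if_pos hi]
    simp only [Option.getD_some]
    rw [Array.getElem?_replicate]
    by_cases hj : j < C
    · simp [hj]
    · simp [hj]
  · simp [hi]

-- ---- generic evaluation of an inner loop writing one row at cells a..a+M-1 ----
lemma pvShape_innerfold (row : Nat) (val : Array (Array Int) → Nat → Int) {R C : Nat}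
    (lst : List Nat) : ∀ t, pvShape t R C →
    pvShape (lst.foldl (fun f j => pvSet2 f row j (val f j)) t) R C := by
  induction lst with
  | nil => intro t h; exact h
  | cons x xs ih => intro t h; exact ih _ (pvShape_set2 _ _ _ h)

lemma pvInnerG_eval (R C row : Nat) (val : Array (Array Int) → Nat → Int)
    (hval : ∀ f g k, (∀ l' k', l' ≠ row → pvGet2 f l' k' = pvGet2 g l' k') → val f k = val g k)
    (hrow : row < R) (a : Nat) :
    ∀ (M : Nat), a + M ≤ C → ∀ (t : Array (Array Int)), pvShape t R C → ∀ (l k : Nat),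
      pvGet2 ((List.range' a M).foldl (fun f j => pvSet2 f row j (val f j)) t) l k
        = if l = row ∧ a ≤ k ∧ k < a + M then val t k else pvGet2 t l k := by
  intro M
  induction M with
  | zero =>
    intro _ t _ l k
    rw [List.range'_zero, List.foldl_nil, if_neg (by omega)]
  | succ M ih =>
    intro hM t ht l k
    have hconc : List.range' a (M+1) = List.range' a M ++ [a+M] := by
      simpa using List.range'_concat (s := a) (n := M) (step := 1)
    rw [hconc, List.foldl_append, List.foldl_cons, List.foldl_nil]
    have hshape : pvShape ((List.range' a M).foldl (fun f j => pvSet2 f row j (val f j)) t) R C :=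
      pvShape_innerfold row val _ t ht
    have hagree : ∀ l' k', l' ≠ row →
        pvGet2 ((List.range' a M).foldl (fun f j => pvSet2 f row j (val f j)) t) l' k'
          = pvGet2 t l' k' := by
      intro l' k' hl'
      rw [ih (by omega) t ht]
      simp [hl']
    have hv : val ((List.range' a M).foldl (fun f j => pvSet2 f row j (val f j)) t) (a+M)
        = val t (a+M) := hval _ _ _ hagree
    rw [pvGet2_set2 _ l k hshape hrow (by omega)]
    by_cases hlk : l = row ∧ k = a + M
    · rcases hlk with ⟨rfl, rfl⟩
      rw [if_pos ⟨rfl, rfl⟩, hv, if_pos ⟨rfl, by omega, by omega⟩]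
    · rw [if_neg hlk, ih (by omega) t ht]
      by_cases hc : l = row ∧ a ≤ k ∧ k < a + M
      · rw [if_pos hc, if_pos ⟨hc.1, hc.2.1, by omega⟩]
      · have hneg : ¬ (l = row ∧ a ≤ k ∧ k < a + (M + 1)) := by
          intro h
          refine hc ⟨h.1, h.2.1, ?_⟩
          rcases Nat.lt_succ_iff_lt_or_eq.mp (by omega : k < (a + M) + 1) with h' | h'
          · exact h'
          · exact absurd ⟨h.1, h'⟩ hlk
        rw [if_neg hc, if_neg hneg]

lemma pvInner_eval (R C row : Nat) (val : Array (Array Int) → Nat → Int)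
    (hval : ∀ f g k, (∀ l' k', l' ≠ row → pvGet2 f l' k' = pvGet2 g l' k') → val f k = val g k)
    (hrow : row < R) :
    ∀ (M : Nat), M < C → ∀ (t : Array (Array Int)), pvShape t R C → ∀ (l k : Nat),
      pvGet2 ((List.range' 1 M).foldl (fun f j => pvSet2 f row j (val f j)) t) l k
        = if l = row ∧ 1 ≤ k ∧ k ≤ M then val t k else pvGet2 t l k := by
  intro M hM t ht l k
  rw [pvInnerG_eval R C row val hval hrow 1 M (by omega) t ht l k]
  by_cases hc : l = row ∧ 1 ≤ k ∧ k ≤ M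
  · rw [if_pos (by omega : l = row ∧ 1 ≤ k ∧ k < 1 + M), if_pos hc]
  · rw [if_neg (by omega : ¬(l = row ∧ 1 ≤ k ∧ k < 1 + M)), if_neg hc]

-- ---- the mismatch-count specification both cost tables satisfy ----
def pvMis (s : List Char) (l r : Int) : Int :=
  if r ≤ l then 0
  else (if s.getD l.toNat ' ' = s.getD r.toNat ' ' then 0 else 1) + pvMis s (l+1) (r-1)
termination_by (r - l).toNat
decreasing_by omega

lemma pvMis_stop (s : List Char) (l r : Int) (h : r ≤ l) : pvMis s l r = 0 := by
  rw [pvMis, if_pos h]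

lemma pvMis_step (s : List Char) (l r : Int) (h : l < r) :
    pvMis s l r
      = (if s.getD l.toNat ' ' = s.getD r.toNat ' ' then 0 else 1) + pvMis s (l+1) (r-1) := by
  rw [pvMis, if_neg (by omega)]

-- ---- A's cost table computes pvMis ----
lemma pvCostVal_congr (s : List Char) (L : Nat) :
    ∀ f g r, (∀ l' k', l' ≠ L → pvGet2 f l' k' = pvGet2 g l' k') →
      pvCostVal s f L r = pvCostVal s g L r := by
  intro f g r h
  unfold pvCostVal
  rw [h (L+1) (r-1) (by omega)]

lemma pvShape_costStep (s : List Char) (n L : Nat) {t : Array (Array Int)}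
    (h : pvShape t n n) : pvShape (pvCostStep s n t L) n n :=
  pvShape_innerfold L (fun f r => pvCostVal s f L r) _ t h

lemma pvShape_costFold (s : List Char) (n : Nat) (lst : List Nat) :
    ∀ t, pvShape t n n → pvShape (lst.foldl (pvCostStep s n) t) n n := by
  induction lst with
  | nil => intro t h; exact h
  | cons x xs ih => intro t h; exact ih _ (pvShape_costStep s n x h)

lemma pvCostA_char (s : List Char) (n : Nat) :
    ∀ d, d ≤ n → ∀ l r,
      pvGet2 (((List.range' (n-d) d).reverse).foldl (pvCostStep s n)
          (Array.replicate n (Array.replicate n 0))) l r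
        = if n - d ≤ l ∧ l < r ∧ r < n then pvMis s (l:Int) (r:Int) else 0 := by
  intro d
  induction d with
  | zero =>
    intro _ l r
    rw [if_neg (by omega), List.range'_zero, List.reverse_nil, List.foldl_nil, pvGet2_replicate]
  | succ d ih =>
    intro hd l r
    have hsplit : List.range' (n-(d+1)) (d+1) = (n-(d+1)) :: List.range' (n-d) d := by
      have h1 : n - (d+1) + 1 = n - d := by omega
      rw [List.range'_succ, h1]
    rw [hsplit, List.reverse_cons, List.foldl_append, List.foldl_cons, List.foldl_nil]
    set L := n - (d+1) with hL
    set prev := ((List.range' (n-d) d).reverse).foldl (pvCostStep s n)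
        (Array.replicate n (Array.replicate n 0)) with hprev
    have hLn : L < n := by omega
    have hshape : pvShape prev n n :=
      pvShape_costFold s n _ _ (pvShape_replicate n n)
    unfold pvCostStep
    rw [pvInnerG_eval n n L (fun f r => pvCostVal s f L r)
          (fun f g r h => pvCostVal_congr s L f g r h) hLn (L+1) (n - (L+1)) (by omega)
          prev hshape l r]
    have hab : L + 1 + (n - (L+1)) = n := by omega
    rw [hab]
    by_cases hc : l = L ∧ L + 1 ≤ r ∧ r < n
    · rcases hc with ⟨rfl, h1, h2⟩
      rw [if_pos ⟨rfl, h1, h2⟩, if_pos (by omega)]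
      have hsub : pvGet2 prev (L+1) (r-1) = pvMis s ((L:Int) + 1) ((r:Int) - 1) := by
        rw [ih (by omega) (L+1) (r-1)]
        by_cases hadj : L + 1 < r - 1
        · have e1 : ((L+1:Nat):Int) = (L:Int)+1 := by omega
          have e2 : ((r-1:Nat):Int) = (r:Int)-1 := by omega
          rw [if_pos (by omega), e1, e2]
        · rw [if_neg (by omega), pvMis_stop s _ _ (by omega)]
      unfold pvCostVal
      rw [hsub, pvMis_step s (L:Int) (r:Int) (by omega)]
      simp only [Int.toNat_natCast]
      by_cases hch : s.getD L ' ' = s.getD r ' '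
      · rw [if_pos hch, if_pos hch]; ring
      · rw [if_neg hch, if_neg hch]; ring
    · rw [if_neg hc, ih (by omega) l r]
      by_cases hc2 : n - d ≤ l ∧ l < r ∧ r < n
      · rw [if_pos hc2, if_pos (by omega)]
      · rw [if_neg hc2, if_neg (by omega)]

lemma pvCostA_get (s : List Char) (n : Nat) (l r : Nat) :
    pvGet2 (pvCost s n) l r = if l ≤ r ∧ r < n then pvMis s (l:Int) (r:Int) else 0 := by
  unfold pvCost
  have hr : List.range n = List.range' (n - n) n := by
    rw [List.range_eq_range']; congr 1; omega
  rw [hr, pvCostA_char s n n (le_refl n) l r]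
  by_cases h1 : l < r ∧ r < n
  · rw [if_pos (by omega), if_pos (by omega)]
  · by_cases h2 : l = r ∧ r < n
    · rw [if_neg (by omega), if_pos (by omega), pvMis_stop s _ _ (by omega)]
    · rw [if_neg (by omega), if_neg (by omega)]

-- ---- B's cost table computes pvMis too ----
lemma pvShape_expand (s : List Char) (n : Nat) :
    ∀ fuel r, n - r ≤ fuel → ∀ (cost : Array (Array Int)) (l : Int) (acc : Int),
      pvShape cost n n → pvShape (pvExpand s n cost l r acc) n n := by
  intro fuel
  induction fuel with
  | zero =>
    intro r hr cost l acc h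
    rw [pvExpand, dif_neg (by omega)]
    exact h
  | succ fuel ih =>
    intro r hr cost l acc h
    rw [pvExpand]
    by_cases hg : 0 ≤ l ∧ r < n
    · rw [dif_pos hg]
      exact ih (r+1) (by omega) _ _ _ (pvShape_set2 _ _ _ h)
    · rw [dif_neg hg]
      exact h

lemma pvExpand_char (s : List Char) (n : Nat) :
    ∀ fuel r, n - r ≤ fuel → ∀ (cost : Array (Array Int)) (l : Int) (acc : Int),
      pvShape cost n n → l < (n:Int) → l ≤ (r:Int) → acc = pvMis s (l+1) ((r:Int)-1) →
      ∀ l' r' : Nat,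
        pvGet2 (pvExpand s n cost l r acc) l' r'
          = if (l':Int) ≤ l ∧ (l':Int) + (r':Int) = l + (r:Int) ∧ r' < n
            then pvMis s (l':Int) (r':Int) else pvGet2 cost l' r' := by
  intro fuel
  induction fuel with
  | zero =>
    intro r hr cost l acc _ _ _ _ l' r'
    have hcond : ¬((l':Int) ≤ l ∧ (l':Int) + (r':Int) = l + (r:Int) ∧ r' < n) := by omega
    rw [pvExpand, dif_neg (by omega : ¬(0 ≤ l ∧ r < n)), if_neg hcond]
  | succ fuel ih =>
    intro r hr cost l acc hshape hln hlr hacc l' r'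
    rw [pvExpand]
    by_cases hg : 0 ≤ l ∧ r < n
    · rw [dif_pos hg]
      have hltn : l.toNat < n := by omega
      have hacc' : acc + (if s.getD l.toNat ' ' = s.getD r ' ' then 0 else 1)
          = pvMis s l (r:Int) := by
        by_cases hel : l = (r:Int)
        · have ha0 : acc = 0 := by rw [hacc, pvMis_stop s _ _ (by omega)]
          have hget : s.getD r ' ' = s.getD l.toNat ' ' := by
            congr 1
            omega
          rw [ha0, pvMis_stop s _ _ (by omega), hget, if_pos rfl]
          norm_num
        · have hlt : l < (r:Int) := lt_of_le_of_ne hlr hel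
          rw [pvMis_step s l (r:Int) hlt, Int.toNat_natCast, hacc]
          ring
      rw [ih (r+1) (by omega) _ (l-1) _ (pvShape_set2 _ _ _ hshape) (by omega) (by omega)
            (by
              rw [hacc']
              have h1 : l - 1 + 1 = l := by ring
              have h2 : (((r+1:Nat)):Int) - 1 = (r:Int) := by omega
              rw [h1, h2]) l' r']
      rw [pvGet2_set2 _ l' r' hshape hltn hg.2]
      by_cases h1 : (l':Int) ≤ l - 1 ∧ (l':Int) + (r':Int) = (l-1) + ((r+1:Nat):Int) ∧ r' < n
      · have htc : (l':Int) ≤ l ∧ (l':Int) + (r':Int) = l + (r:Int) ∧ r' < n := by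
          push_cast at h1; omega
        rw [if_pos h1, if_pos htc]
      · rw [if_neg h1]
        by_cases h2 : l' = l.toNat ∧ r' = r
        · have htc : (l':Int) ≤ l ∧ (l':Int) + (r':Int) = l + (r:Int) ∧ r' < n := by omega
          rw [if_pos h2, if_pos htc]
          have hc1 : ((l':Nat):Int) = l := by omega
          rw [hacc', h2.2, hc1]
        · have htc : ¬((l':Int) ≤ l ∧ (l':Int) + (r':Int) = l + (r:Int) ∧ r' < n) := by
            push_cast at h1; omega
          rw [if_neg h2, if_neg htc]
    · have hcond : ¬((l':Int) ≤ l ∧ (l':Int) + (r':Int) = l + (r:Int) ∧ r' < n) := by omega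
      rw [dif_neg hg, if_neg hcond]

lemma pvShape_costBFold (s : List Char) (n : Nat) (lst : List Nat) :
    ∀ t, pvShape t n n →
      pvShape (lst.foldl
        (fun (cost : Array (Array Int)) (c : Nat) => pvExpand s n (pvExpand s n cost (c:Int) c 0) (c:Int) (c+1) 0) t) n n := by
  induction lst with
  | nil => intro t h; exact h
  | cons x xs ih =>
    intro t h
    exact ih _ (pvShape_expand s n (n - (x+1)) (x+1) (le_refl _) _ _ _
      (pvShape_expand s n (n - x) x (le_refl _) _ _ _ h))

lemma pvCostB_char (s : List Char) (n : Nat) :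
    ∀ C, C ≤ n → ∀ l r : Nat,
      pvGet2 ((List.range C).foldl
          (fun (cost : Array (Array Int)) (c : Nat) => pvExpand s n (pvExpand s n cost (c : Int) c 0) (c : Int) (c+1) 0)
          (Array.replicate n (Array.replicate n 0))) l r
        = if l ≤ r ∧ r < n ∧ l + r < 2*C then pvMis s (l:Int) (r:Int) else 0 := by
  intro C
  induction C with
  | zero =>
    intro _ l r
    rw [List.range_zero, List.foldl_nil, pvGet2_replicate, if_neg (by omega)]
  | succ C ih =>
    intro hC l r
    rw [List.range_succ, List.foldl_append, List.foldl_cons, List.foldl_nil]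
    set prev := (List.range C).foldl
        (fun (cost : Array (Array Int)) (c : Nat) => pvExpand s n (pvExpand s n cost (c : Int) c 0) (c : Int) (c+1) 0)
        (Array.replicate n (Array.replicate n 0)) with hprev
    have hshape : pvShape prev n n := pvShape_costBFold s n _ _ (pvShape_replicate n n)
    have hCn : C < n := hC
    have hshape_mid : pvShape (pvExpand s n prev (C:Int) C 0) n n :=
      pvShape_expand s n (n - C) C (le_refl _) _ _ _ hshape
    have hmid := pvExpand_char s n (n - C) C (le_refl _) prev (C:Int) 0 hshape
        (by exact_mod_cast hCn) (le_refl _)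
        (by rw [pvMis_stop s ((C:Int)+1) ((C:Int)-1) (by omega)])
    have hnew := pvExpand_char s n (n - (C+1)) (C+1) (le_refl _)
        (pvExpand s n prev (C:Int) C 0) (C:Int) 0 hshape_mid
        (by exact_mod_cast hCn) (by push_cast; omega)
        (by rw [pvMis_stop s ((C:Int)+1) (((C+1:Nat):Int)-1) (by push_cast; omega)])
    rw [hnew l r, hmid l r, ih (by omega) l r]
    split_ifs <;> first | rfl | omega

lemma pvCostB_get (s : List Char) (n : Nat) (l r : Nat) :
    pvGet2 (pvCostB s n) l r = if l ≤ r ∧ r < n then pvMis s (l:Int) (r:Int) else 0 := by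
  unfold pvCostB
  rw [pvCostB_char s n n (le_refl n) l r]
  by_cases h : l ≤ r ∧ r < n
  · rw [if_pos (by omega), if_pos h]
  · rw [if_neg (by omega), if_neg h]

-- ---- 1-D array facts for B's rolling rounds ----
lemma pvGetD_setIfInBounds (a : Array Int) (i j : Nat) (v : Int) :
    (a.setIfInBounds i v).getD j 0 = if j = i ∧ i < a.size then v else a.getD j 0 := by
  rw [Array.getD_eq_getD_getElem?, Array.getD_eq_getD_getElem?, Array.getElem?_setIfInBounds]
  by_cases hij : i = j
  · subst hij
    by_cases hsz : i < a.size
    · rw [if_pos rfl, if_pos hsz, if_pos ⟨rfl, hsz⟩, Option.getD_some]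
    · rw [if_pos rfl, if_neg hsz, if_neg (by tauto), Array.getElem?_eq_none (by omega)]
  · rw [if_neg hij, if_neg (by tauto)]

lemma pvGetD_replicate (m j : Nat) : (Array.replicate m (0:Int)).getD j 0 = 0 := by
  rw [Array.getD_eq_getD_getElem?, Array.getElem?_replicate]
  by_cases h : j < m
  · rw [if_pos h, Option.getD_some]
  · rw [if_neg h]; rfl

lemma pvFoldlSet1 (f : Nat → Int) :
    ∀ (lst : List Nat) (a : Array Int) (j : Nat),
      (lst.foldl (fun nd i => nd.setIfInBounds i (f i)) a).getD j 0
        = if j ∈ lst ∧ j < a.size then f j else a.getD j 0 := by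
  intro lst
  induction lst with
  | nil => intro a j; rw [List.foldl_nil, if_neg (by simp)]
  | cons x xs ih =>
    intro a j
    rw [List.foldl_cons, ih, Array.size_setIfInBounds, pvGetD_setIfInBounds]
    by_cases hmem : j ∈ xs ∧ j < a.size
    · rw [if_pos hmem, if_pos ⟨by simp [hmem.1], hmem.2⟩]
    · rw [if_neg hmem]
      by_cases hx : j = x ∧ x < a.size
      · have hja : j < a.size := by rw [hx.1]; exact hx.2
        rw [if_pos hx, if_pos ⟨by simp [hx.1], hja⟩, hx.1]
      · rw [if_neg hx, if_neg (by
          intro hcon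
          rcases List.mem_cons.mp hcon.1 with h | h
          · exact hx ⟨h, h ▸ hcon.2⟩
          · exact hmem ⟨h, hcon.2⟩)]

lemma pvRound_get (cost : Array (Array Int)) (n k : Nat) (dp : Array Int) (i : Nat) :
    (pvRound cost n dp k).getD i 0 = if k ≤ i ∧ i ≤ n then pvRowVal cost dp k i else 0 := by
  unfold pvRound
  rw [pvFoldlSet1, Array.size_replicate]
  by_cases h : k ≤ i ∧ i ≤ n
  · rw [if_pos ⟨List.mem_range'_1.mpr ⟨h.1, by omega⟩, by omega⟩, if_pos h]
  · rw [if_neg (by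
        intro hcon
        have := List.mem_range'_1.mp hcon.1
        omega), if_neg h, pvGetD_replicate]

-- ---- the two optimal-value recursions ----
-- first-split recursion (A's dfs): opt c b a k = min changes to split s[a:b] into k palindromes
def pvOpt (c : Nat → Nat → Int) (b : Nat) : Nat → Nat → Int
  | _, 0 => 0
  | a, 1 => c a (b-1)
  | a, k+2 => pvListMin ((List.range' (a+1) ((b - (k+2) + 2) - (a+1))).map
      (fun nl => c a (nl-1) + pvOpt c b nl (k+1)))
termination_by a k => k

-- last-split recursion (B's): optF c i k, prefix of length i into k palindromes
def pvOptF (c : Nat → Nat → Int) : Nat → Nat → Int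
  | _, 0 => 0
  | i, 1 => c 0 (i-1)
  | i, k+2 => pvListMin ((List.range' (k+1) (i - (k+1))).map
      (fun m => pvOptF c m (k+1) + c m (i-1)))
termination_by i k => k

lemma pvOpt_two (c : Nat → Nat → Int) (b a k : Nat) (hk : 2 ≤ k) :
    pvOpt c b a k = pvListMin ((List.range' (a+1) ((b - k + 2) - (a+1))).map
      (fun nl => c a (nl-1) + pvOpt c b nl (k-1))) := by
  obtain ⟨k', rfl⟩ : ∃ k', k = k' + 2 := ⟨k - 2, by omega⟩
  rw [pvOpt]
  norm_num

lemma pvOptF_two (c : Nat → Nat → Int) (i k : Nat) (hk : 2 ≤ k) :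
    pvOptF c i k = pvListMin ((List.range' (k-1) (i - (k-1))).map
      (fun m => pvOptF c m (k-1) + c m (i-1))) := by
  obtain ⟨k', rfl⟩ : ∃ k', k = k' + 2 := ⟨k - 2, by omega⟩
  rw [pvOptF]
  norm_num

-- ---- the exchange lemma: first-split min = last-split min ----
lemma pvOpt_exchange (c : Nat → Nat → Int) :
    ∀ k, 1 ≤ k → ∀ a b, a + k + 1 ≤ b →
      pvOpt c b a (k+1) = pvListMin ((List.range' (a+k) (b - a - k)).map
        (fun m => pvOpt c m a k + c m (b-1))) := by
  intro k
  induction k with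
  | zero => omega
  | succ k ih =>
    intro _ a b hb
    by_cases hk : k = 0
    · subst hk
      rw [pvOpt_two c b a 2 (by omega)]
      have hlen : (b - 2 + 2) - (a + 1) = b - a - 1 := by omega
      rw [hlen]
      apply congrArg
      apply List.map_congr_left
      intro nl hnl
      have hm := (List.mem_range'_1).mp hnl
      show c a (nl-1) + pvOpt c b nl 1 = pvOpt c nl a 1 + c nl (b-1)
      simp [pvOpt]
    · have hk1 : 1 ≤ k := by omega
      rw [pvOpt_two c b a (k+2) (by omega)]
      have hlen : (b - (k+2) + 2) - (a + 1) = b - a - (k+1) := by omega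
      rw [hlen]
      have step1 : ∀ nl ∈ List.range' (a+1) (b - a - (k+1)),
          c a (nl-1) + pvOpt c b nl (k+1)
            = pvListMin ((List.range' (nl+k) (b - nl - k)).map
                (fun m => c a (nl-1) + (pvOpt c m nl k + c m (b-1)))) := by
        intro nl hnl
        have hm := (List.mem_range'_1).mp hnl
        rw [ih hk1 nl b (by omega)]
        rw [← pvListMin_map_add_left (c a (nl-1)) (fun m => pvOpt c m nl k + c m (b-1))
              (pvRange'_ne_nil _ _ (by omega))]
      have hred : k + 2 - 1 = k + 1 := rfl
      rw [hred, List.map_congr_left step1]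
      rw [show (List.range' (a+1) (b - a - (k+1))).map
            (fun nl => pvListMin ((List.range' (nl+k) (b - nl - k)).map
                (fun m => c a (nl-1) + (pvOpt c m nl k + c m (b-1)))))
          = (List.range' (a+1) (b - a - (k+1))).map
            (fun nl => pvListMin ((fun nl => (List.range' (nl+k) (b - nl - k)).map
                (fun m => c a (nl-1) + (pvOpt c m nl k + c m (b-1)))) nl)) from rfl]
      rw [pvListMin_nested _ _ (pvRange'_ne_nil _ _ (by omega))
            (by
              intro nl hnl
              have hm := (List.mem_range'_1).mp hnl
              simpa using pvRange'_ne_nil (nl+k) (b - nl - k) (by omega))]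
      have step2 : ∀ m ∈ List.range' (a+(k+1)) (b - a - (k+1)),
          pvOpt c m a (k+1) + c m (b-1)
            = pvListMin ((List.range' (a+1) (m - a - k)).map
                (fun nl => (c a (nl-1) + pvOpt c m nl k) + c m (b-1))) := by
        intro m hm
        have hmm := (List.mem_range'_1).mp hm
        rw [pvOpt_two c m a (k+1) (by omega)]
        have hlen2 : (m - (k+1) + 2) - (a + 1) = m - a - k := by omega
        rw [hlen2]
        rw [← pvListMin_map_add_right (c m (b-1)) (fun nl => c a (nl-1) + pvOpt c m nl (k+1-1))
              (pvRange'_ne_nil _ _ (by omega))]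
        have : k + 1 - 1 = k := by omega
        simp [this]
      rw [List.map_congr_left step2]
      rw [show (List.range' (a+(k+1)) (b - a - (k+1))).map
            (fun m => pvListMin ((List.range' (a+1) (m - a - k)).map
                (fun nl => (c a (nl-1) + pvOpt c m nl k) + c m (b-1))))
          = (List.range' (a+(k+1)) (b - a - (k+1))).map
            (fun m => pvListMin ((fun m => (List.range' (a+1) (m - a - k)).map
                (fun nl => (c a (nl-1) + pvOpt c m nl k) + c m (b-1))) m)) from rfl]
      rw [pvListMin_nested _ _ (pvRange'_ne_nil _ _ (by omega))
            (by
              intro m hm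
              have hmm := (List.mem_range'_1).mp hm
              simpa using pvRange'_ne_nil (a+1) (m - a - k) (by omega))]
      apply pvListMin_congr_mem
      · cases hfm : (List.range' (a+1) (b - a - (k+1))).flatMap
            (fun nl => (List.range' (nl+k) (b - nl - k)).map
                (fun m => c a (nl-1) + (pvOpt c m nl k + c m (b-1)))) with
        | nil =>
          exfalso
          have : (c a (a+1-1) + (pvOpt c (a+1+k) (a+1) k + c (a+1+k) (b-1))) ∈
              (List.range' (a+1) (b - a - (k+1))).flatMap
                (fun nl => (List.range' (nl+k) (b - nl - k)).map
                    (fun m => c a (nl-1) + (pvOpt c m nl k + c m (b-1)))) := by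
            apply List.mem_flatMap.mpr
            refine ⟨a+1, ?_, ?_⟩
            · exact (List.mem_range'_1).mpr ⟨by omega, by omega⟩
            · exact List.mem_map.mpr ⟨a+1+k, (List.mem_range'_1).mpr ⟨by omega, by omega⟩, rfl⟩
          rw [hfm] at this
          cases this
        | cons x xs => simp
      · cases hfm : (List.range' (a+(k+1)) (b - a - (k+1))).flatMap
            (fun m => (List.range' (a+1) (m - a - k)).map
                (fun nl => (c a (nl-1) + pvOpt c m nl k) + c m (b-1))) with
        | nil =>
          exfalso
          have : ((c a (a+1-1) + pvOpt c (a+k+1) (a+1) k) + c (a+k+1) (b-1)) ∈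
              (List.range' (a+(k+1)) (b - a - (k+1))).flatMap
                (fun m => (List.range' (a+1) (m - a - k)).map
                    (fun nl => (c a (nl-1) + pvOpt c m nl k) + c m (b-1))) := by
            apply List.mem_flatMap.mpr
            refine ⟨a+k+1, ?_, ?_⟩
            · exact (List.mem_range'_1).mpr ⟨by omega, by omega⟩
            · exact List.mem_map.mpr ⟨a+1, (List.mem_range'_1).mpr ⟨by omega, by omega⟩, rfl⟩
          rw [hfm] at this
          cases this
        | cons x xs => simp
      · intro x
        constructor
        · intro hx
          rcases List.mem_flatMap.mp hx with ⟨nl, hnl, hx2⟩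
          rcases List.mem_map.mp hx2 with ⟨m, hm, rfl⟩
          have h1 := (List.mem_range'_1).mp hnl
          have h2 := (List.mem_range'_1).mp hm
          apply List.mem_flatMap.mpr
          refine ⟨m, (List.mem_range'_1).mpr ⟨by omega, by omega⟩, ?_⟩
          refine List.mem_map.mpr ⟨nl, (List.mem_range'_1).mpr ⟨by omega, by omega⟩, ?_⟩
          ring
        · intro hx
          rcases List.mem_flatMap.mp hx with ⟨m, hm, hx2⟩
          rcases List.mem_map.mp hx2 with ⟨nl, hnl, rfl⟩
          have h1 := (List.mem_range'_1).mp hm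
          have h2 := (List.mem_range'_1).mp hnl
          apply List.mem_flatMap.mpr
          refine ⟨nl, (List.mem_range'_1).mpr ⟨by omega, by omega⟩, ?_⟩
          refine List.mem_map.mpr ⟨m, (List.mem_range'_1).mpr ⟨by omega, by omega⟩, ?_⟩
          ring

-- B's recursion computes the same optimum as A's
lemma pvOptF_eq_pvOpt (c : Nat → Nat → Int) :
    ∀ k i, 1 ≤ k → k ≤ i → pvOptF c i k = pvOpt c i 0 k := by
  intro k
  induction k using Nat.strong_induction_on with
  | _ k ih =>
    intro i h1 h2
    match k, h1 with
    | 1, _ => simp [pvOptF, pvOpt]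
    | (k'+2), _ =>
      rw [pvOptF]
      have hmap : ∀ m ∈ List.range' (k'+1) (i - (k'+1)),
          pvOptF c m (k'+1) + c m (i-1) = pvOpt c m 0 (k'+1) + c m (i-1) := by
        intro m hm
        have h := (List.mem_range'_1).mp hm
        rw [ih (k'+1) (by omega) m (by omega) (by omega)]
      rw [List.map_congr_left hmap]
      rw [pvOpt_exchange c (k'+1) (by omega) 0 i (by omega)]
      norm_num

-- ---- characterization of A's DP table ----
lemma pvValA_congr (cost : Array (Array Int)) (n L : Nat) :
    ∀ f g k, (∀ l' k', l' ≠ L → pvGet2 f l' k' = pvGet2 g l' k') →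
      pvValA cost n f L k = pvValA cost n g L k := by
  intro f g k hagree
  unfold pvValA
  by_cases hk : k = 1
  · simp [hk]
  · rw [if_neg hk, if_neg hk]
    apply congrArg
    apply List.map_congr_left
    intro nl hnl
    have h := (List.mem_range'_1).mp hnl
    rw [hagree nl (k-1) (by omega)]

lemma pvShape_stepA (cost : Array (Array Int)) (n kk : Nat) (L : Nat)
    {t : Array (Array Int)} (h : pvShape t n (kk+1)) :
    pvShape (pvStepA cost n kk t L) n (kk+1) :=
  pvShape_innerfold L (fun f k => pvValA cost n f L k) _ t h

lemma pvShape_foldlA (cost : Array (Array Int)) (n kk : Nat) (lst : List Nat) :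
    ∀ t, pvShape t n (kk+1) → pvShape (lst.foldl (pvStepA cost n kk) t) n (kk+1) := by
  induction lst with
  | nil => intro t h; exact h
  | cons x xs ih => intro t h; exact ih _ (pvShape_stepA cost n kk x h)

lemma pvA_char (cost : Array (Array Int)) (n kk : Nat) :
    ∀ d, d ≤ n → ∀ l k,
      pvGet2 (((List.range' (n-d) d).reverse).foldl (pvStepA cost n kk)
          (Array.replicate n (Array.replicate (kk+1) 0))) l k
        = if n - d ≤ l ∧ l < n ∧ 1 ≤ k ∧ k ≤ min (n - l) kk
            then pvOpt (fun a b => pvGet2 cost a b) n l k else 0 := by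
  intro d
  induction d with
  | zero =>
    intro _ l k
    rw [if_neg (by omega), List.range'_zero, List.reverse_nil, List.foldl_nil, pvGet2_replicate]
  | succ d ih =>
    intro hd l k
    have hsplit : List.range' (n-(d+1)) (d+1) = (n-(d+1)) :: List.range' (n-d) d := by
      have h1 : n - (d+1) + 1 = n - d := by omega
      rw [List.range'_succ, h1]
    rw [hsplit, List.reverse_cons, List.foldl_append, List.foldl_cons, List.foldl_nil]
    set L := n - (d+1) with hL
    set prev := ((List.range' (n-d) d).reverse).foldl (pvStepA cost n kk)
        (Array.replicate n (Array.replicate (kk+1) 0)) with hprev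
    have hLn : L < n := by omega
    have hM : min (n - L + 1) (kk + 1) - 1 = min (n - L) kk := by omega
    have hshape : pvShape prev n (kk+1) :=
      pvShape_foldlA cost n kk _ _ (pvShape_replicate n (kk+1))
    unfold pvStepA
    rw [hM]
    rw [pvInner_eval n (kk+1) L (fun f k => pvValA cost n f L k)
          (fun f g k h => pvValA_congr cost n L f g k h) hLn
          (min (n - L) kk) (by omega) prev hshape l k]
    by_cases hc : l = L ∧ 1 ≤ k ∧ k ≤ min (n - L) kk
    · rcases hc with ⟨rfl, hk1, hk2⟩
      rw [if_pos ⟨rfl, hk1, hk2⟩, if_pos (by omega)]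
      by_cases hk : k = 1
      · subst hk
        unfold pvValA
        simp [pvOpt]
      · unfold pvValA
        rw [if_neg hk]
        rw [pvOpt_two (fun a b => pvGet2 cost a b) n L k (by omega)]
        apply congrArg
        apply List.map_congr_left
        intro nl hnl
        have h := (List.mem_range'_1).mp hnl
        rw [ih (by omega) nl (k-1)]
        rw [if_pos (by omega)]
    · rw [if_neg hc, ih (by omega) l k]
      by_cases hc2 : n - d ≤ l ∧ l < n ∧ 1 ≤ k ∧ k ≤ min (n - l) kk
      · rw [if_pos hc2, if_pos (by omega)]
      · rw [if_neg hc2, if_neg (by omega)]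

-- ---- characterization of B's rolling rounds ----
lemma pvB_char (cost : Array (Array Int)) (n : Nat) :
    ∀ kk i,
      ((List.range' 1 kk).foldl (pvRound cost n) (Array.replicate (n+1) 0)).getD i 0
        = if 1 ≤ kk ∧ kk ≤ i ∧ i ≤ n then pvOptF (fun a b => pvGet2 cost a b) i kk else 0 := by
  intro kk
  induction kk with
  | zero =>
    intro i
    rw [List.range'_zero, List.foldl_nil, pvGetD_replicate, if_neg (by omega)]
  | succ kk ih =>
    intro i
    have hconc : List.range' 1 (kk+1) = List.range' 1 kk ++ [1+kk] := by
      simpa using List.range'_concat (s := 1) (n := kk) (step := 1)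
    rw [hconc, List.foldl_append, List.foldl_cons, List.foldl_nil, pvRound_get]
    by_cases h : 1 + kk ≤ i ∧ i ≤ n
    · rw [if_pos h, if_pos (by omega)]
      by_cases hk0 : kk = 0
      · subst hk0
        simp [pvRowVal, pvOptF]
      · unfold pvRowVal
        rw [if_neg (by omega)]
        rw [pvOptF_two (fun a b => pvGet2 cost a b) i (kk+1) (by omega)]
        have he : 1 + kk - 1 = kk := by omega
        have he2 : kk + 1 - 1 = kk := by omega
        rw [he, he2]
        apply congrArg
        apply List.map_congr_left
        intro m hm
        have hmr := List.mem_range'_1.mp hm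
        rw [ih m, if_pos (by omega)]
    · rw [if_neg h, if_neg (by omega)]

-- ---- the unconditional equality of the two ports ----
lemma pvPorts_eq (s : String) (K : Int) :
    palindromePartition s K = palindromePartition_alt s K := by
  show pvGet2 (((List.range s.length).reverse).foldl
          (pvStepA (pvCost s.toList s.length) s.length K.toNat)
          (Array.replicate s.length (Array.replicate (K.toNat+1) 0))) 0 K.toNat
      = ((List.range' 1 K.toNat).foldl (pvRound (pvCostB s.toList s.length) s.length)
          (Array.replicate (s.length+1) 0)).getD s.length 0
  set n := s.length with hn
  set cs := s.toList with hcs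
  set kk := K.toNat with hkk
  have hcfun : (fun a b => pvGet2 (pvCostB cs n) a b) = (fun a b => pvGet2 (pvCost cs n) a b) :=
    funext fun a => funext fun b => by rw [pvCostB_get, pvCostA_get]
  have hA : List.range n = List.range' (n - n) n := by
    rw [List.range_eq_range']; congr 1; omega
  rw [hA, pvA_char (pvCost cs n) n kk n (le_refl n) 0 kk, pvB_char (pvCostB cs n) n kk n, hcfun]
  by_cases hc : 0 < n ∧ 1 ≤ kk ∧ kk ≤ n
  · rw [if_pos (by omega), if_pos (by omega)]
    exact (pvOptF_eq_pvOpt (fun a b => pvGet2 (pvCost cs n) a b) kk n (by omega) (by omega)).symm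
  · rw [if_neg (by omega), if_neg (by omega)]

-- ===== VERDICT (by name: the statements are the Claim_ definitions above) =====
theorem palindromePartition_spec : Claim_equal_palindromePartition := by
  intro s K _ _
  unfold Spec_palindromePartition
  exact pvPorts_eq s K
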